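-- pv_equiv track=rewrite | github.com/pierrealexandreguillemin-a11y/pocket_arbiter | scripts/archive/evaluation/annales/parse_annales.py | _group_questions_by_sequence
-- ===== SOURCE A (Python) =====
-- from typing import Any
--
-- def _group_questions_by_sequence(
--     questions: list[dict[str, Any]],
-- ) -> list[list[dict[str, Any]]]:
--     """
--     Group questions by contiguous sequences (Q1, Q2, ... Q30 = one UV).
--
--     Each UV starts fresh with Question 1.
--     """
--     if not questions:
--         return []
--
--     groups: list[list[dict[str, Any]]] = []
--     current_group: list[dict[str, Any]] = []
--
--     for q in questions:
--         q_num = q["num"]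
--
--         # New sequence starts when we see Q1 again
--         if q_num == 1 and current_group:
--             groups.append(current_group)
--             current_group = []
--
--         current_group.append(q)
--
--     if current_group:
--         groups.append(current_group)
--
--     return groups
-- ===== SOURCE B (Python) =====
-- def _group_questions_by_sequence(questions):
--     """Split into contiguous runs by slicing at each new Q1 (index-scan + slices)."""
--     groups = []
--     start = 0
--     while start < len(questions):
--         end = start + 1
--         while end < len(questions) and questions[end]["num"] != 1:
--             end += 1
--         groups.append(questions[start:end])
--         start = end
--     return groups
-- ===== Notes on version B (the rewrite author's own statement) =====
-- stated objective: alternative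
-- what changed: Replaces A's single-pass accumulator loop (groups/current_group with flush-on-Q1) by an index-based splitter: scan for the end of each run (the next question with num==1) and emit the group as a slice questions[start:end].
import Mathlib
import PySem

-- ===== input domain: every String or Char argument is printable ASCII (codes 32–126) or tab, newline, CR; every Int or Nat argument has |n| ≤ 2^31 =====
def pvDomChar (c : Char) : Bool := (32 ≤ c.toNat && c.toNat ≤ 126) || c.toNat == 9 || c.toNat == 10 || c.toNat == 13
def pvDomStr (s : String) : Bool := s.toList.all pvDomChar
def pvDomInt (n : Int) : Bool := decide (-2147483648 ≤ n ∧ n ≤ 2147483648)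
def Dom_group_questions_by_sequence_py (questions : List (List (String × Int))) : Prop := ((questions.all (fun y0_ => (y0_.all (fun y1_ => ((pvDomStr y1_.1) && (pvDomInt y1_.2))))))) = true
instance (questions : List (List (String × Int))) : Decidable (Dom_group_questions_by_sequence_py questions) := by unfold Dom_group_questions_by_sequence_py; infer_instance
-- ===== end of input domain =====

-- B replaces A's accumulator loop by index-scan-and-slice splitting; same O(n) cost (objective: alternative).

-- q["num"] as a Python dict lookup on the association list (shared primitive helper)
def qnum (q : List (String × Int)) : Option Int := (PySem.Dict.ofList q).get? "num"
def isOne (q : List (String × Int)) : Bool := qnum q == some 1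

-- ===== PORT A =====
-- the for-loop over questions with state (groups, current_group)
def loopA : List (List (String × Int)) → List (List (List (String × Int))) → List (List (String × Int)) → List (List (List (String × Int))) × List (List (String × Int))
  | [], groups, cur => (groups, cur)
  | q :: qs, groups, cur =>
    if isOne q = true ∧ cur ≠ [] then loopA qs (groups ++ [cur]) [q]
    else loopA qs groups (cur ++ [q])

def group_questions_by_sequence_py (questions : List (List (String × Int))) : List (List (List (String × Int))) :=
  if questions = [] then []
  else
    let r := loopA questions [] []
    if r.2 = [] then r.1 else r.1 ++ [r.2]

-- ===== PORT B =====
-- inner while loop: advance end while end < len and questions[end]["num"] != 1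
def advanceB (qs : List (List (String × Int))) (i : Nat) : Nat :=
  if h : i < qs.length then
    if isOne qs[i] then i else advanceB qs (i + 1)
  else i
termination_by qs.length - i

theorem advanceB_ge (qs : List (List (String × Int))) (i : Nat) : i ≤ advanceB qs i := by
  unfold advanceB
  split
  · split
    · exact le_refl _
    · exact le_trans (Nat.le_succ i) (advanceB_ge qs (i + 1))
  · exact le_refl _
termination_by qs.length - i

-- outer while loop: emit questions[start:end] and continue at end
def outerB (qs : List (List (String × Int))) (groups : List (List (List (String × Int)))) (start : Nat) : List (List (List (String × Int))) :=
  if _h : start < qs.length then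
    let e := advanceB qs (start + 1)
    outerB qs (groups ++ [PySem.List.slice qs (some (start : Int)) (some (e : Int))]) e
  else groups
termination_by qs.length - start
decreasing_by
  have := advanceB_ge qs (start + 1)
  omega

def group_questions_by_sequence_py_alt (questions : List (List (String × Int))) : List (List (List (String × Int))) :=
  outerB questions [] 0

-- ===== PRECONDITION & SPEC =====
-- Pre_: exactly the inputs on which Python A returns (A reads q["num"] of every question; a missing "num" key raises KeyError)
def Pre_group_questions_by_sequence_py (questions : List (List (String × Int))) : Prop :=
  ∀ q ∈ questions, (qnum q).isSome = true
instance (questions : List (List (String × Int))) : Decidable (Pre_group_questions_by_sequence_py questions) := by unfold Pre_group_questions_by_sequence_py; infer_instance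

def pvWitness_group_questions_by_sequence_py : (List (List (String × Int))) :=
  [[("num", 1)], [("num", 2), ("txt", 7)], [("num", 1)], [("num", 2)]]

def Spec_group_questions_by_sequence_py (questions : List (List (String × Int))) (out : List (List (List (String × Int)))) : Prop := out = group_questions_by_sequence_py_alt questions
instance (questions : List (List (String × Int))) (out : List (List (List (String × Int)))) : Decidable (Spec_group_questions_by_sequence_py questions out) := by unfold Spec_group_questions_by_sequence_py; infer_instance

-- ===== CLAIM (what is proved, stated in full; the proofs are below) =====
def Claim_equal_group_questions_by_sequence_py : Prop := ∀ (questions : List (List (String × Int))), Dom_group_questions_by_sequence_py questions → Pre_group_questions_by_sequence_py questions → Spec_group_questions_by_sequence_py questions (group_questions_by_sequence_py questions)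

-- ===== LEMMAS AND PROOFS =====

-- ghost reference recursion: split at each later element with num == 1
def splitRec : List (List (String × Int)) → List (List (List (String × Int)))
  | [] => []
  | q :: qs =>
      (q :: qs.takeWhile (fun x => !isOne x)) :: splitRec (qs.dropWhile (fun x => !isOne x))
termination_by l => l.length
decreasing_by
  simpa using Nat.lt_succ_of_le (List.length_dropWhile_le (fun x => !isOne x) qs)

theorem drop_length_takeWhile {α : Type} (p : α → Bool) (l : List α) :
    l.drop (l.takeWhile p).length = l.dropWhile p := by
  induction l with
  | nil => simp
  | cons a l ih =>
    by_cases h : p a = true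
    · simp [h, ih]
    · simp [h]

theorem take_length_takeWhile {α : Type} (p : α → Bool) (l : List α) :
    l.take (l.takeWhile p).length = l.takeWhile p := by
  have h := List.takeWhile_prefix (l := l) p
  exact (List.prefix_iff_eq_take.mp h).symm

theorem advanceB_eq (qs : List (List (String × Int))) (i : Nat) :
    advanceB qs i = i + ((qs.drop i).takeWhile (fun x => !isOne x)).length := by
  rw [advanceB]
  by_cases h : i < qs.length
  · rw [dif_pos h, List.drop_eq_getElem_cons h, List.takeWhile_cons]
    by_cases h1 : isOne qs[i] = true
    · simp [h1]
    · rw [if_neg h1, advanceB_eq qs (i + 1)]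
      simp [h1]
      omega
  · rw [dif_neg h, List.drop_eq_nil_of_le (by omega)]
    simp
termination_by qs.length - i

theorem outerB_eq (qs : List (List (String × Int))) (start : Nat) (groups : List (List (List (String × Int)))) :
    outerB qs groups start = groups ++ splitRec (qs.drop start) := by
  unfold outerB
  split
  · rename_i h
    rw [outerB_eq qs (advanceB qs (start + 1))]
    have he := advanceB_eq qs (start + 1)
    set k := ((qs.drop (start + 1)).takeWhile (fun x => !isOne x)).length with hk
    -- the slice questions[start:end]
    have hsl : PySem.List.slice qs (some (start : Int)) (some ((advanceB qs (start + 1)) : Int))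
        = qs[start] :: (qs.drop (start + 1)).takeWhile (fun x => !isOne x) := by
      rw [PySem.List.slice_natCast]
      rw [List.drop_eq_getElem_cons h]
      have : advanceB qs (start + 1) - start = k + 1 := by omega
      rw [this]
      rw [List.take_succ_cons]
      congr 1
      have : qs.drop (start + 1) = qs.drop (start + 1) := rfl
      rw [take_length_takeWhile]
    have hdr : qs.drop (advanceB qs (start + 1)) = (qs.drop (start + 1)).dropWhile (fun x => !isOne x) := by
      rw [← drop_length_takeWhile (fun x => !isOne x) (qs.drop (start + 1)), List.drop_drop, ← hk, he]
    rw [hsl, hdr]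
    rw [List.drop_eq_getElem_cons h]
    rw [splitRec]
    simp
  · rename_i h
    rw [List.drop_eq_nil_of_le (by omega)]
    simp [splitRec]
termination_by qs.length - start
decreasing_by
  have := advanceB_ge qs (start + 1)
  omega

theorem loopA_eq (qs : List (List (String × Int))) :
    ∀ (groups : List (List (List (String × Int)))) (cur : List (List (String × Int))), cur ≠ [] →
      (if (loopA qs groups cur).2 = [] then (loopA qs groups cur).1 else (loopA qs groups cur).1 ++ [(loopA qs groups cur).2])
        = groups ++ (cur ++ qs.takeWhile (fun x => !isOne x)) :: splitRec (qs.dropWhile (fun x => !isOne x)) := by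
  induction qs with
  | nil => intro groups cur hc; simp [loopA, hc, splitRec]
  | cons q qs ih =>
    intro groups cur hc
    by_cases h1 : isOne q = true
    · rw [show loopA (q :: qs) groups cur = loopA qs (groups ++ [cur]) [q] by simp [loopA, h1, hc]]
      rw [ih (groups ++ [cur]) [q] (by simp)]
      simp [h1, splitRec]
    · rw [show loopA (q :: qs) groups cur = loopA qs groups (cur ++ [q]) by simp [loopA, h1]]
      rw [ih groups (cur ++ [q]) (by simp)]
      simp [h1]

-- ===== VERDICT (by name: the statement is the Claim_ definition above) =====
theorem group_questions_by_sequence_py_spec : Claim_equal_group_questions_by_sequence_py := by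
  intro questions _ _
  unfold Spec_group_questions_by_sequence_py
  unfold group_questions_by_sequence_py group_questions_by_sequence_py_alt
  rw [outerB_eq]
  simp only [List.drop_zero, List.nil_append]
  cases questions with
  | nil => simp [splitRec]
  | cons q qs =>
    simp only [reduceCtorEq, if_false]
    rw [show loopA (q :: qs) [] [] = loopA qs [] [q] by simp [loopA]]
    rw [loopA_eq qs [] [q] (by simp)]
    simp [splitRec]
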